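-- pv_equiv track=rewrite | github.com/benbendaisy/CommunicationCodes | python_module/examples/1402_Reducing_Dishes.py | maxSatisfaction1
-- ===== SOURCE A (Python) =====
-- from typing import List
--
-- def maxSatisfaction1(satisfaction: List[int]) -> int:
--     sorted_satisfaction = sorted(satisfaction, reverse=True)
--     local_sum, res = 0, 0
--     for i in sorted_satisfaction:
--         if local_sum + i > 0:
--             local_sum += i
--             res += local_sum
--     return res
-- ===== SOURCE B (Python) =====
-- def maxSatisfaction1(satisfaction):
--     a = sorted(satisfaction)
--     n = len(a)
--     best = 0
--     for s in range(n + 1):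
--         total = 0
--         for i in range(s, n):
--             total += a[i] * (i - s + 1)
--         if total > best:
--             best = total
--     return best
-- ===== Notes on version B (the rewrite author's own statement) =====
-- stated objective: alternative
-- what changed: Replaces A's single greedy conditional accumulation over the descending sort with an exhaustive O(n^2) search: sort ascending and, for every cut-off s, recompute the weighted satisfaction of keeping the suffix a[s:] with a fresh inner loop, returning the running maximum (0 allows cooking nothing).
import Mathlib
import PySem

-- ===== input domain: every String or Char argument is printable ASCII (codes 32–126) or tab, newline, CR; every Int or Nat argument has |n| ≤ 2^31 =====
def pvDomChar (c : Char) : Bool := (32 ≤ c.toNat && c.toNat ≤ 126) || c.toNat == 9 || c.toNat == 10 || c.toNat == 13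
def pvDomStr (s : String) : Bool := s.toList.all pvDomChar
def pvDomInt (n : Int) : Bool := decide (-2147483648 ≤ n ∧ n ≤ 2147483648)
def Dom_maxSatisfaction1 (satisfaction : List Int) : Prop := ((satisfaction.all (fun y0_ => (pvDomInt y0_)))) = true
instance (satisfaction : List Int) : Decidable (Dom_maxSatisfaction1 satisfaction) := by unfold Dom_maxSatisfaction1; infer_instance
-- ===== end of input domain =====

-- B replaces A's single greedy accumulation with an exhaustive O(n^2) search: for every
-- cut-off s it recomputes the weighted satisfaction of the kept suffix with a fresh inner
-- loop and keeps the running maximum (alternative decomposition, slower but plainer).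

-- ===== PORT A =====
def maxSatisfaction1 (satisfaction : List Int) : Int :=
  ((PySem.List.sorted satisfaction (fun x => x) true).foldl
    (fun (st : Int × Int) i =>
      if st.1 + i > 0 then (st.1 + i, st.2 + (st.1 + i)) else st) (0, 0)).2

-- ===== PORT B =====
def maxSatisfaction1_alt (satisfaction : List Int) : Int :=
  let a := PySem.List.sorted satisfaction (fun x => x) false
  let n : Int := a.length
  (PySem.List.pyRange 0 (n + 1) 1).foldl
    (fun best s =>
      let total := (PySem.List.pyRange s n 1).foldl
        (fun t i => t + PySem.List.pyGetD a i 0 * (i - s + 1)) 0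
      if total > best then total else best) 0

-- ===== PRECONDITION & SPEC =====
def Spec_maxSatisfaction1 (satisfaction : List Int) (out : Int) : Prop := out = maxSatisfaction1_alt satisfaction
instance (satisfaction : List Int) (out : Int) : Decidable (Spec_maxSatisfaction1 satisfaction out) := by unfold Spec_maxSatisfaction1; infer_instance

-- ===== CLAIM (what is proved, stated in full; the proofs are below) =====
def Claim_equal_maxSatisfaction1 : Prop := ∀ (satisfaction : List Int), Dom_maxSatisfaction1 satisfaction → Spec_maxSatisfaction1 satisfaction (maxSatisfaction1 satisfaction)

-- ===== LEMMAS AND PROOFS =====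

-- keepW l = Σ l[i] * (i+1): the satisfaction of cooking exactly the dishes of l in order.
def keepW : List Int → Int
  | [] => 0
  | x :: t => (x + t.sum) + keepW t

-- bestW l = best satisfaction over all suffixes of l (including the empty one).
def bestW : List Int → Int
  | [] => 0
  | x :: t => max (keepW (x :: t)) (bestW t)

-- grec t = A's fold, consumed right-to-left over the ascending list.
def grec : List Int → Int × Int
  | [] => (0, 0)
  | x :: t =>
      let st := grec t
      if st.1 + x > 0 then (st.1 + x, st.2 + (st.1 + x)) else st

theorem grec_eq_foldr (t : List Int) :
    t.foldr (fun x (st : Int × Int) =>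
      if st.1 + x > 0 then (st.1 + x, st.2 + (st.1 + x)) else st) (0, 0) = grec t := by
  induction t with
  | nil => rfl
  | cons x t ih => simp [grec, List.foldr, ih]

theorem sum_le_length_mul (c : Int) : ∀ (d : List Int), (∀ z ∈ d, z ≤ c) → d.sum ≤ d.length * c := by
  intro d
  induction d with
  | nil => simp
  | cons z d ih =>
    intro h
    have hz := h z (by simp)
    have hd := ih (fun y hy => h y (by simp [hy]))
    simp only [List.sum_cons, List.length_cons]
    push_cast
    nlinarith

theorem keepW_append_le (κ : List Int) (hS : 0 ≤ κ.sum) :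
    ∀ (d : List Int), (∀ y ∈ d, κ.sum + y ≤ 0) → keepW (d ++ κ) ≤ keepW κ := by
  intro d
  induction d with
  | nil => simp
  | cons y d ih =>
    intro h
    have hy := h y (by simp)
    have hd : ∀ z ∈ d, z ≤ -κ.sum := by
      intro z hz
      have := h z (by simp [hz])
      omega
    have hsum : d.sum ≤ d.length * (-κ.sum) := sum_le_length_mul _ d hd
    have ih' := ih (fun z hz => h z (by simp [hz]))
    have : keepW ((y :: d) ++ κ) = (y + (d ++ κ).sum) + keepW (d ++ κ) := rfl
    rw [this]
    have hlen : (0 : Int) ≤ d.length := by positivity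
    have : (y + (d ++ κ).sum) ≤ 0 := by
      simp only [List.sum_append]
      nlinarith
    omega

-- Main greedy invariant: on an ascending list, grec keeps exactly the best suffix.
theorem grec_spec : ∀ (t : List Int), t.Pairwise (· ≤ ·) →
    ∃ k, k ≤ t.length ∧ grec t = ((t.drop k).sum, keepW (t.drop k))
      ∧ bestW t = keepW (t.drop k)
      ∧ 0 ≤ (t.drop k).sum
      ∧ ∀ y ∈ t.take k, (t.drop k).sum + y ≤ 0 := by
  intro t
  induction t with
  | nil => exact fun _ => ⟨0, by simp [grec, keepW, bestW]⟩
  | cons x t ih =>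
    intro hp
    have hx : ∀ y ∈ t, x ≤ y := (List.pairwise_cons.mp hp).1
    obtain ⟨k, hk, hgrec, hbest, hS, htake⟩ := ih (List.pairwise_cons.mp hp).2
    by_cases hacc : (t.drop k).sum + x > 0
    · -- accept: then no element was ever dropped, i.e. k = 0
      have hk0 : k = 0 := by
        by_contra hne
        have hlen : 0 < t.length := by omega
        have hl : 0 < (t.take k).length := by
          rw [List.length_take]; omega
        obtain ⟨y, hy⟩ := List.exists_mem_of_length_pos hl
        have h1 := htake y hy
        have h2 := hx y (List.mem_of_mem_take hy)
        omega
      subst hk0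
      simp only [List.drop_zero] at hgrec hbest hS hacc
      refine ⟨0, by simp, ?_, ?_, by simpa using by omega, by simp⟩
      · show grec (x :: t) = ((x :: t).sum, keepW (x :: t))
        simp only [grec, hgrec]
        rw [if_pos (by simpa using hacc)]
        simp only [List.sum_cons, keepW, Prod.mk.injEq]
        constructor <;> omega
      · show bestW (x :: t) = keepW (x :: t)
        simp only [bestW, hbest]
        have : keepW (x :: t) = (x + t.sum) + keepW t := rfl
        omega
    · -- skip
      refine ⟨k + 1, by simp; omega, ?_, ?_, ?_, ?_⟩
      · show grec (x :: t) = (((x :: t).drop (k+1)).sum, keepW ((x :: t).drop (k+1)))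
        simp only [List.drop_succ_cons]
        simp only [grec, hgrec]
        rw [if_neg (by simpa using hacc)]
      · show bestW (x :: t) = keepW ((x :: t).drop (k+1))
        simp only [List.drop_succ_cons, bestW, hbest]
        have hsplit : x :: t = (x :: t.take k) ++ t.drop k := by
          simp [List.take_append_drop]
        have hle : keepW (x :: t) ≤ keepW (t.drop k) := by
          rw [hsplit]
          apply keepW_append_le _ hS
          intro y hy
          rcases List.mem_cons.mp hy with h | h
          · omega
          · exact htake y h
        omega
      · simpa using hS
      · intro y hy
        simp only [List.drop_succ_cons]
        rcases List.mem_cons.mp (by simpa using hy) with h | h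
        · omega
        · exact htake y h

-- Python's sorted(xs, reverse=True) on plain ints is the reverse of sorted(xs).
theorem sorted_rev_eq_reverse (xs : List Int) :
    PySem.List.sorted xs (fun x => x) true = (PySem.List.sorted xs (fun x => x) false).reverse := by
  have h1 : (PySem.List.sorted xs (fun x => x) true).Perm
      ((PySem.List.sorted xs (fun x => x) false).reverse) := by
    exact (PySem.List.sorted_perm xs (fun x => x) true).trans
      ((PySem.List.sorted_perm xs (fun x => x) false).symm.trans
        (List.reverse_perm _).symm)
  have h2 : (PySem.List.sorted xs (fun x => x) true).Pairwise (fun a b => b ≤ a) := by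
    simpa using PySem.List.sorted_pairwise_rev xs (fun x => x)
  have h3 : ((PySem.List.sorted xs (fun x => x) false).Pairwise (fun a b => a ≤ b)) := by
    simpa using PySem.List.sorted_pairwise xs (fun x => x)
  have h4 : ((PySem.List.sorted xs (fun x => x) false).reverse.Pairwise (fun a b => b ≤ a)) := by
    rw [List.pairwise_reverse]
    exact h3
  exact h1.eq_of_pairwise (fun a b _ _ hab hba => le_antisymm hba hab) h2 h4

-- A equals bestW of the ascending sort.
theorem portA_eq_bestW (satisfaction : List Int) :
    maxSatisfaction1 satisfaction = bestW (PySem.List.sorted satisfaction (fun x => x) false) := by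
  set a := PySem.List.sorted satisfaction (fun x => x) false with ha
  have hpw : a.Pairwise (· ≤ ·) := by
    simpa using PySem.List.sorted_pairwise satisfaction (fun x => x)
  unfold maxSatisfaction1
  rw [sorted_rev_eq_reverse, ← ha, List.foldl_reverse]
  rw [grec_eq_foldr a]
  obtain ⟨k, _, hgrec, hbest, _, _⟩ := grec_spec a hpw
  rw [hgrec, hbest]

-- B-side: the inner loop at cut-off s computes keepW of the kept suffix a[s:].
theorem inner_eq_keepW (a : List Int) :
    ∀ (k : Nat) (s : Int), 0 ≤ s → s ≤ (a.length : Int) → ((a.length : Int) - s).toNat = k →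
    (PySem.List.pyRange s (a.length : Int) 1).foldl
      (fun t i => t + PySem.List.pyGetD a i 0 * (i - s + 1)) 0
      = keepW (a.drop s.toNat) := by
  intro k
  induction k with
  | zero =>
    intro s h0 hle hk
    have hs : s = (a.length : Int) := by omega
    subst hs
    rw [PySem.List.pyRange_one_eq_nil (by omega)]
    simp [keepW]
  | succ k ih =>
    intro s h0 hle hk
    have hlt : s < (a.length : Int) := by omega
    rw [PySem.List.pyRange_one_cons hlt]
    simp only [List.foldl_cons]
    rw [PySem.List.foldl_add (g := fun i => PySem.List.pyGetD a i 0 * (i - s + 1))]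
    have hsplit : ((PySem.List.pyRange (s+1) (a.length : Int) 1).map
        (fun i => PySem.List.pyGetD a i 0 * (i - s + 1))).sum
        = ((PySem.List.pyRange (s+1) (a.length : Int) 1).map
            (fun i => PySem.List.pyGetD a i 0 * (i - (s+1) + 1))).sum
          + ((PySem.List.pyRange (s+1) (a.length : Int) 1).map
            (fun i => PySem.List.pyGetD a i 0)).sum := by
      rw [← PySem.List.sum_map_add_int]
      congr 1
      apply List.map_congr_left
      intro i _
      ring
    have hih := PySem.List.foldl_add
      (l := PySem.List.pyRange (s+1) (a.length : Int) 1)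
      (g := fun i => PySem.List.pyGetD a i 0 * (i - (s+1) + 1)) (a := (0:Int))
    have hih2 := ih (s+1) (by omega) (by omega) (by omega)
    rw [PySem.List.foldl_add (g := fun i => PySem.List.pyGetD a i 0 * (i - (s+1) + 1))] at hih2
    have hsuffix : ((PySem.List.pyRange (s+1) (a.length : Int) 1).map
        (fun i => PySem.List.pyGetD a i 0)).sum = (a.drop (s+1).toNat).sum := by
      rw [PySem.List.map_pyGetD_pyRange' a 0 (show (0:Int) ≤ s + 1 by omega)]
    have hnat : s.toNat < a.length := by omega
    have hdropcons : a.drop s.toNat = a[s.toNat] :: a.drop (s.toNat + 1) :=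
      List.drop_eq_getElem_cons hnat
    have hget : PySem.List.pyGetD a s 0 = a[s.toNat] :=
      PySem.List.pyGetD_eq_getElem a 0 h0 (by exact_mod_cast hlt)
    have hsucc : (s+1).toNat = s.toNat + 1 := by omega
    rw [hdropcons]
    show 0 + PySem.List.pyGetD a s 0 * (s - s + 1)
        + ((PySem.List.pyRange (s+1) (a.length : Int) 1).map
            (fun i => PySem.List.pyGetD a i 0 * (i - s + 1))).sum
        = (a[s.toNat] + (a.drop (s.toNat + 1)).sum) + keepW (a.drop (s.toNat + 1))
    rw [hsucc] at hih2 hsuffix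
    rw [hsplit, hget]
    omega

theorem bestW_nonneg : ∀ (l : List Int), 0 ≤ bestW l := by
  intro l
  induction l with
  | nil => simp [bestW]
  | cons x t ih => simp only [bestW]; omega

theorem bestW_drop (l : List Int) (m : Nat) :
    bestW (l.drop m) = max (keepW (l.drop m)) (bestW (l.drop (m+1))) := by
  by_cases h : m < l.length
  · rw [List.drop_eq_getElem_cons h]
    rfl
  · rw [List.drop_of_length_le (by omega), List.drop_of_length_le (by omega)]
    simp [bestW, keepW]

-- B-side: the outer running-max loop computes bestW of the suffix it still scans.
theorem outer_eq_bestW (a : List Int) :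
    ∀ (k : Nat) (s b : Int), 0 ≤ b → 0 ≤ s → s ≤ (a.length : Int) + 1 →
      ((a.length : Int) + 1 - s).toNat = k →
    (PySem.List.pyRange s ((a.length : Int) + 1) 1).foldl
      (fun best s' =>
        if keepW (a.drop s'.toNat) > best then keepW (a.drop s'.toNat) else best) b
      = max b (bestW (a.drop s.toNat)) := by
  intro k
  induction k with
  | zero =>
    intro s b hb h0 hle hk
    have hs : s = (a.length : Int) + 1 := by omega
    subst hs
    rw [PySem.List.pyRange_one_eq_nil (by omega)]
    rw [List.drop_of_length_le (by omega)]
    simp only [List.foldl_nil, bestW]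
    omega
  | succ k ih =>
    intro s b hb h0 hle hk
    have hlt : s < (a.length : Int) + 1 := by omega
    rw [PySem.List.pyRange_one_cons hlt]
    simp only [List.foldl_cons]
    have hstep := ih (s+1) (if keepW (a.drop s.toNat) > b then keepW (a.drop s.toNat) else b)
      (by split_ifs <;> omega) (by omega) (by omega) (by omega)
    rw [hstep]
    have hsucc : (s+1).toNat = s.toNat + 1 := by omega
    rw [hsucc, bestW_drop a s.toNat]
    split_ifs <;> omega

-- B equals bestW of the ascending sort.
theorem portB_eq_bestW (satisfaction : List Int) :
    maxSatisfaction1_alt satisfaction = bestW (PySem.List.sorted satisfaction (fun x => x) false) := by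
  set a := PySem.List.sorted satisfaction (fun x => x) false with ha
  show (PySem.List.pyRange 0 ((a.length : Int) + 1) 1).foldl
      (fun best s =>
        if (PySem.List.pyRange s (a.length : Int) 1).foldl
            (fun t i => t + PySem.List.pyGetD a i 0 * (i - s + 1)) 0 > best
        then (PySem.List.pyRange s (a.length : Int) 1).foldl
            (fun t i => t + PySem.List.pyGetD a i 0 * (i - s + 1)) 0
        else best) 0 = bestW a
  rw [PySem.List.foldl_congr_mem _ _
      (fun best s' => if keepW (a.drop s'.toNat) > best then keepW (a.drop s'.toNat) else best) 0
      (by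
        intro acc x hx
        have hmem := (PySem.List.mem_pyRange_one).mp hx
        rw [inner_eq_keepW a ((a.length : Int) - x).toNat x (by omega) (by omega) rfl])]
  rw [outer_eq_bestW a ((a.length : Int) + 1).toNat 0 0 le_rfl le_rfl (by omega) (by omega)]
  simp only [Int.toNat_zero, List.drop_zero]
  have := bestW_nonneg a
  omega

-- ===== VERDICT (by name: the statement is the Claim_ definition above) =====
theorem maxSatisfaction1_spec : Claim_equal_maxSatisfaction1 := by
  intro satisfaction _
  show maxSatisfaction1 satisfaction = maxSatisfaction1_alt satisfaction
  rw [portA_eq_bestW, portB_eq_bestW]
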